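-- pv_equiv track=rewrite | github.com/delete/spymanager | src/user.py | _extract_json_data_from_html
-- ===== SOURCE A (Python) =====
-- def _extract_json_data_from_html(html_page):
--     json_text = ''
--     lines = html_page.split('\n')
--     for line in lines:
--         if 'window._sharedData =' in line:
--             json_text = line
--             break
--     return json_text
-- ===== SOURCE B (Python) =====
-- def _extract_json_data_from_html(html_page):
--     pos = html_page.find('window._sharedData =')
--     if pos == -1:
--         return ''
--     start = html_page.rfind('\n', 0, pos) + 1
--     end = html_page.find('\n', pos)
--     if end == -1:
--         end = len(html_page)
--     return html_page[start:end]
-- ===== Notes on version B (the rewrite author's own statement) =====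
-- stated objective: alternative
-- what changed: Instead of splitting the page into a list of lines and scanning them for the marker, B finds the marker's position directly with str.find and expands it to the enclosing line via rfind/find of the surrounding newlines.
import Mathlib
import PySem

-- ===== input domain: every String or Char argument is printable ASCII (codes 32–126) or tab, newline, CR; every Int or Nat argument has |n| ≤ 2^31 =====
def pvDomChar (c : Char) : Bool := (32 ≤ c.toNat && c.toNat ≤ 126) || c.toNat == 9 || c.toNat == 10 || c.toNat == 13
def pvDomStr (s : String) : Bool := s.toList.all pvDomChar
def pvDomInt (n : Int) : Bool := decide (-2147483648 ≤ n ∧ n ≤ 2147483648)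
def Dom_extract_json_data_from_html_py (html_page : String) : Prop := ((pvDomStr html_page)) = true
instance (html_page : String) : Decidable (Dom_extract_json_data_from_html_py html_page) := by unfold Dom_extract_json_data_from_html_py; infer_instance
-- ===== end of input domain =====

-- B replaces A's split-into-lines-and-scan by locating the marker with find and expanding to the
-- enclosing line with rfind/find of the surrounding newlines (objective: alternative algorithm).

-- ===== PORT A =====
-- the for-loop with break: returns the first line containing the marker, else the initial ''
def pvLoopA : List String → String
  | [] => ""
  | line :: rest =>
    if PySem.Str.isIn "window._sharedData =" line then line else pvLoopA rest

def extract_json_data_from_html_py (html_page : String) : String :=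
  pvLoopA ((PySem.Str.split? html_page "\n").getD [])

-- ===== PORT B =====
def extract_json_data_from_html_py_alt (html_page : String) : String :=
  let pos := PySem.Str.find html_page "window._sharedData ="
  if pos = -1 then ""
  else
    let start := PySem.Str.rfindFrom html_page "\n" 0 (some pos) + 1
    let e := PySem.Str.findFrom html_page "\n" pos none
    let e := if e = -1 then PySem.Str.len html_page else e
    PySem.Str.slice html_page (some start) (some e)

-- ===== PRECONDITION & SPEC =====
def Spec_extract_json_data_from_html_py (html_page : String) (out : String) : Prop := out = extract_json_data_from_html_py_alt html_page
instance (html_page : String) (out : String) : Decidable (Spec_extract_json_data_from_html_py html_page out) := by unfold Spec_extract_json_data_from_html_py; infer_instance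

-- ===== CLAIM (what is proved, stated in full; the proofs are below) =====
def Claim_equal_extract_json_data_from_html_py : Prop := ∀ (html_page : String), Dom_extract_json_data_from_html_py html_page → Spec_extract_json_data_from_html_py html_page (extract_json_data_from_html_py html_page)

-- ===== LEMMAS AND PROOFS =====

-- Chars-level shadow of A: split at '\n' accumulating the current piece
def pvSplitNL (pre : List Char) : List Char → List (List Char)
  | [] => [pre]
  | c :: t => if c = '\n' then pre :: pvSplitNL [] t else pvSplitNL (pre ++ [c]) t

-- Chars-level shadow of A's loop
def pvA (sub : List Char) : List (List Char) → List Char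
  | [] => []
  | p :: ps => if PySem.Chars.isIn sub p then p else pvA sub ps

-- Chars-level shadow of B
def pvB (sub cs : List Char) : List Char :=
  if PySem.Chars.find cs sub = -1 then []
  else
    PySem.Chars.slice cs (some (PySem.Chars.rfindFrom cs ['\n'] 0 (some (PySem.Chars.find cs sub)) + 1))
      (some (if PySem.Chars.findFrom cs ['\n'] (PySem.Chars.find cs sub) none = -1 then (cs.length : Int)
             else PySem.Chars.findFrom cs ['\n'] (PySem.Chars.find cs sub) none))

theorem pvGo_eq (fuel : Nat) : ∀ (l cur : List Char) (acc : List (List Char)), l.length < fuel →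
    PySem.Chars.splitOn.go ['\n'] fuel l cur acc = acc.reverse ++ pvSplitNL cur.reverse l := by
  induction fuel with
  | zero => intro l cur acc h; omega
  | succ fuel ih =>
    intro l cur acc h
    cases l with
    | nil => simp [PySem.Chars.splitOn.go, pvSplitNL]
    | cons c rest =>
      by_cases hc : c = '\n'
      · subst hc
        have hpre : ['\n'].isPrefixOf ('\n' :: rest) = true := by simp [List.isPrefixOf]
        rw [PySem.Chars.splitOn.go]
        simp only [hpre, if_true, List.length_cons, List.length_nil, List.drop_succ_cons, List.drop_zero]
        rw [ih rest [] (cur.reverse :: acc) (by simpa using Nat.lt_of_succ_lt_succ h)]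
        simp [pvSplitNL]
      · have hpre : ['\n'].isPrefixOf (c :: rest) = false := by
          simp [List.isPrefixOf]; exact fun hh => hc hh.symm
        rw [PySem.Chars.splitOn.go]
        simp only [hpre, Bool.false_eq_true, if_false]
        rw [ih rest (c :: cur) acc (by simpa using Nat.lt_of_succ_lt_succ h)]
        simp [pvSplitNL, hc]

theorem pvSplitOn_eq (cs : List Char) : PySem.Chars.splitOn cs ['\n'] = pvSplitNL [] cs := by
  have := pvGo_eq (cs.length + 1) cs [] [] (by omega)
  simpa [PySem.Chars.splitOn] using this

theorem pvSplitNL_no (t : List Char) : ∀ pre, '\n' ∉ t → pvSplitNL pre t = [pre ++ t] := by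
  induction t with
  | nil => intro pre _; simp [pvSplitNL]
  | cons c t ih =>
    intro pre h
    simp only [List.mem_cons, not_or] at h
    have hc : ¬ c = '\n' := fun hh => h.1 hh.symm
    simp [pvSplitNL, hc, ih (pre ++ [c]) h.2]

theorem pvSplitNL_app (l : List Char) : ∀ pre (rest : List Char), '\n' ∉ l →
    pvSplitNL pre (l ++ '\n' :: rest) = (pre ++ l) :: pvSplitNL [] rest := by
  induction l with
  | nil => intro pre rest _; simp [pvSplitNL]
  | cons c l ih =>
    intro pre rest h
    simp only [List.mem_cons, not_or] at h
    have hc : ¬ c = '\n' := fun hh => h.1 hh.symm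
    simp [pvSplitNL, hc, ih (pre ++ [c]) rest h.2]

theorem pvFirstNL (cs : List Char) (h : '\n' ∈ cs) :
    ∃ l rest, cs = l ++ '\n' :: rest ∧ '\n' ∉ l := by
  induction cs with
  | nil => simp at h
  | cons c t ih =>
    by_cases hc : c = '\n'
    · exact ⟨[], t, by simp [hc], by simp⟩
    · have ht : '\n' ∈ t := by
        rcases List.mem_cons.mp h with hh | hh
        · exact absurd hh.symm hc
        · exact hh
      obtain ⟨l, rest, heq, hnl⟩ := ih ht
      exact ⟨c :: l, rest, by simp [heq], by
        simp only [List.mem_cons, not_or]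
        exact ⟨fun hh => hc hh.symm, hnl⟩⟩

-- single-char prefix-at-an-index characterisation
theorem pvSingle (c : Char) (s : List Char) (i : Nat) : [c] <+: s.drop i ↔ s[i]? = some c := by
  have hh : s[i]? = (s.drop i)[0]? := by rw [List.getElem?_drop]; simp
  rw [hh]
  cases hdrop : s.drop i with
  | nil => simp
  | cons d t => simp [List.cons_prefix_cons, eq_comm]

theorem pvCover (sub a b : List Char) (c : Char) (h : sub <+: a ++ c :: b)
    (hl : a.length < sub.length) : c ∈ sub := by
  obtain ⟨t, ht⟩ := h
  have h2 : (a ++ c :: b)[a.length]? = some c := by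
    rw [List.getElem?_append_right (le_refl a.length)]
    simp
  rw [← ht, List.getElem?_append_left hl] at h2
  exact List.mem_of_getElem? h2

theorem pvOccSplit (sub l rest : List Char) (i : Nat) (h1 : '\n' ∉ sub)
    (h : sub <+: (l ++ '\n' :: rest).drop i) (hne : sub ≠ []) :
    (i + sub.length ≤ l.length ∧ sub <+: l.drop i) ∨
    (l.length + 1 ≤ i ∧ sub <+: rest.drop (i - (l.length + 1))) := by
  rcases Nat.lt_or_ge l.length i with hi | hi
  · right
    refine ⟨by omega, ?_⟩
    have hd : (l ++ '\n' :: rest).drop i = rest.drop (i - (l.length + 1)) := by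
      rw [List.drop_append, List.drop_eq_nil_of_le (by omega)]
      rw [show i - l.length = (i - (l.length + 1)) + 1 by omega]
      simp
    rwa [hd] at h
  · have hd : (l ++ '\n' :: rest).drop i = l.drop i ++ '\n' :: rest := by
      rw [List.drop_append]
      rw [Nat.sub_eq_zero_of_le hi]
      simp
    rw [hd] at h
    rcases Nat.lt_or_ge (l.length - i) sub.length with hs | hs
    · exfalso
      exact h1 (pvCover sub (l.drop i) rest '\n' h (by simp; omega))
    · left
      refine ⟨by omega, ?_⟩
      rw [List.prefix_iff_eq_take, List.take_append_of_le_length (by simp; omega)] at h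
      rw [h]
      exact List.take_prefix _ _

theorem pvOccL (sub l rest : List Char) (i : Nat) (hi : i ≤ l.length) (h : sub <+: l.drop i) :
    sub <+: (l ++ '\n' :: rest).drop i := by
  have hd : (l ++ '\n' :: rest).drop i = l.drop i ++ '\n' :: rest := by
    rw [List.drop_append, Nat.sub_eq_zero_of_le hi]
    simp
  rw [hd]
  exact h.trans (List.prefix_append _ _)

theorem pvOccR (sub l rest : List Char) (j : Nat) (h : sub <+: rest.drop j) :
    sub <+: (l ++ '\n' :: rest).drop (l.length + 1 + j) := by
  have hd : (l ++ '\n' :: rest).drop (l.length + 1 + j) = rest.drop j := by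
    rw [List.drop_append, List.drop_eq_nil_of_le (by omega)]
    rw [show l.length + 1 + j - l.length = j + 1 by omega]
    simp
  rwa [hd]

theorem pvInfixSingle (c : Char) (s : List Char) : [c] <:+: s ↔ c ∈ s := by
  constructor
  · intro h
    exact h.subset (by simp)
  · intro h
    obtain ⟨i, hilt, hi⟩ := List.getElem_of_mem h
    have hp : [c] <+: s.drop i := by
      rw [pvSingle]
      simp [List.getElem?_eq_getElem hilt, hi]
    exact hp.isInfix.trans (List.drop_suffix i s).isInfix

theorem pvFindEq (s sub : List Char) (k : Nat) (hk : sub <+: s.drop k)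
    (hmin : ∀ i < k, ¬ sub <+: s.drop i) : PySem.Chars.find s sub = k := by
  have hinfix : sub <:+: s := by
    rw [← PySem.Chars.isIn_iff_infix, ← PySem.Chars.exists_prefix_drop_iff_isIn]
    exact ⟨k, hk⟩
  have h0 : 0 ≤ PySem.Chars.find s sub := (PySem.Chars.find_nonneg_iff s sub).mpr hinfix
  obtain ⟨hp, hmin'⟩ := PySem.Chars.find_spec h0
  have htn : (PySem.Chars.find s sub).toNat = k := by
    rcases lt_trichotomy (PySem.Chars.find s sub).toNat k with hlt | heq | hgt
    · exact absurd hp (hmin _ hlt)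
    · exact heq
    · exact absurd hk (hmin' _ hgt)
  omega

theorem pvRfindGoSpec (j : Nat) (s sub : List Char) :
    (PySem.Chars.rfind.go s sub j = -1 ∧ ∀ i ≤ j, ¬ sub <+: s.drop i) ∨
    (∃ k : Nat, PySem.Chars.rfind.go s sub j = k ∧ k ≤ j ∧ sub <+: s.drop k ∧
      ∀ i, k < i → i ≤ j → ¬ sub <+: s.drop i) := by
  induction j with
  | zero =>
    by_cases hp : sub.isPrefixOf s
    · right
      refine ⟨0, by simp [PySem.Chars.rfind.go, hp], le_rfl, by
        simpa using List.isPrefixOf_iff_prefix.mp hp, fun i h1 h2 => by omega⟩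
    · left
      refine ⟨by simp [PySem.Chars.rfind.go, hp], fun i hi => ?_⟩
      have : i = 0 := by omega
      subst this
      simpa using fun hc => hp (List.isPrefixOf_iff_prefix.mpr hc)
  | succ j ih =>
    by_cases hp : sub.isPrefixOf (s.drop (j + 1))
    · right
      refine ⟨j + 1, by simp [PySem.Chars.rfind.go, hp], le_rfl,
        List.isPrefixOf_iff_prefix.mp hp, fun i h1 h2 => by omega⟩
    · have hgo : PySem.Chars.rfind.go s sub (j + 1) = PySem.Chars.rfind.go s sub j := by
        simp [PySem.Chars.rfind.go, hp]
      have hnp : ¬ sub <+: s.drop (j + 1) := fun hc => hp (List.isPrefixOf_iff_prefix.mpr hc)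
      rcases ih with ⟨h1, h2⟩ | ⟨k, hk1, hk2, hk3, hk4⟩
      · left
        refine ⟨by rw [hgo]; exact h1, fun i hi => ?_⟩
        rcases Nat.lt_or_ge i (j + 1) with hh | hh
        · exact h2 i (by omega)
        · have : i = j + 1 := by omega
          subst this; exact hnp
      · right
        refine ⟨k, by rw [hgo]; exact hk1, by omega, hk3, fun i hi1 hi2 => ?_⟩
        rcases Nat.lt_or_ge i (j + 1) with hh | hh
        · exact hk4 i hi1 (by omega)
        · have : i = j + 1 := by omega
          subst this; exact hnp

theorem pvRfindEq (s sub : List Char) (k : Nat) (hk : sub <+: s.drop k) (hks : k ≤ s.length)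
    (hmax : ∀ i, k < i → ¬ sub <+: s.drop i) : PySem.Chars.rfind s sub = k := by
  have hgo : PySem.Chars.rfind s sub = PySem.Chars.rfind.go s sub s.length := rfl
  rcases pvRfindGoSpec s.length s sub with ⟨h1, h2⟩ | ⟨k', hk1, hk2, hk3, hk4⟩
  · exact absurd hk (h2 k hks)
  · rcases lt_trichotomy k' k with hlt | heq | hgt
    · exact absurd hk (hk4 k hlt hks)
    · rw [hgo, hk1, heq]
    · exact absurd hk3 (hmax k' hgt)

theorem pvRfindSingleNeg (c : Char) (s : List Char) (h : c ∉ s) :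
    PySem.Chars.rfind s [c] = -1 := by
  have hgo : PySem.Chars.rfind s [c] = PySem.Chars.rfind.go s [c] s.length := rfl
  rcases pvRfindGoSpec s.length s [c] with ⟨h1, _⟩ | ⟨k, _, _, hk3, _⟩
  · rw [hgo, h1]
  · exfalso
    rw [pvSingle] at hk3
    exact h (List.mem_of_getElem? hk3)

theorem pvRfindSingleNegIff (c : Char) (s : List Char) :
    PySem.Chars.rfind s [c] = -1 ↔ c ∉ s := by
  constructor
  · intro heq hc
    obtain ⟨i, hilt, hi⟩ := List.getElem_of_mem hc
    have hp : [c] <+: s.drop i := by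
      rw [pvSingle]
      simp [List.getElem?_eq_getElem hilt, hi]
    have hgo : PySem.Chars.rfind s [c] = PySem.Chars.rfind.go s [c] s.length := rfl
    rcases pvRfindGoSpec s.length s [c] with ⟨_, h2⟩ | ⟨k, hk1, _, _, _⟩
    · exact h2 i (by omega) hp
    · rw [hgo, hk1] at heq; omega
  · exact pvRfindSingleNeg c s

theorem pvRfindApp (a b : List Char) (c : Char) :
    PySem.Chars.rfind (a ++ c :: b) [c] =
      if PySem.Chars.rfind b [c] = -1 then (a.length : Int)
      else a.length + 1 + PySem.Chars.rfind b [c] := by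
  by_cases hb : PySem.Chars.rfind b [c] = -1
  · rw [if_pos hb]
    have hcb : c ∉ b := (pvRfindSingleNegIff c b).mp hb
    apply pvRfindEq
    · rw [pvSingle, List.getElem?_append_right (le_refl a.length)]
      simp
    · simp
    · intro i hi hpre
      rw [pvSingle, List.getElem?_append_right (by omega)] at hpre
      rw [show i - a.length = (i - a.length - 1) + 1 by omega, List.getElem?_cons_succ] at hpre
      exact hcb (List.mem_of_getElem? hpre)
  · rw [if_neg hb]
    have hgo : PySem.Chars.rfind b [c] = PySem.Chars.rfind.go b [c] b.length := rfl
    rcases pvRfindGoSpec b.length b [c] with ⟨h1, _⟩ | ⟨k, hk1, hk2, hk3, hk4⟩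
    · exact absurd (hgo.trans h1) hb
    · rw [hgo, hk1]
      rw [show (a.length : Int) + 1 + (k : Int) = ((a.length + 1 + k : Nat) : Int) by push_cast; ring]
      apply pvRfindEq
      · rw [pvSingle, List.getElem?_append_right (by omega)]
        rw [show a.length + 1 + k - a.length = k + 1 by omega, List.getElem?_cons_succ]
        rw [pvSingle] at hk3
        exact hk3
      · simp; omega
      · intro i hi hpre
        rw [pvSingle, List.getElem?_append_right (by omega)] at hpre
        rw [show i - a.length = (i - a.length - 1) + 1 by omega, List.getElem?_cons_succ] at hpre
        have hjb : i - a.length - 1 ≤ b.length := by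
          by_contra hcon
          rw [List.getElem?_eq_none (by omega)] at hpre
          simp at hpre
        exact hk4 (i - a.length - 1) (by omega) hjb ((pvSingle c b _).mpr hpre)

theorem pvFindSingleApp (a b : List Char) (c : Char) (h : c ∉ a) :
    PySem.Chars.find (a ++ c :: b) [c] = a.length := by
  apply pvFindEq
  · rw [pvSingle, List.getElem?_append_right (le_refl a.length)]
    simp
  · intro i hi hpre
    rw [pvSingle, List.getElem?_append_left hi] at hpre
    exact h (List.mem_of_getElem? hpre)

theorem pvFindSingleNeg (c : Char) (s : List Char) (h : c ∉ s) :
    PySem.Chars.find s [c] = -1 := by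
  rw [PySem.Chars.find_eq_neg_one_iff]
  intro hc
  exact h ((pvInfixSingle c s).mp hc)

theorem pvFindInL (sub l rest : List Char) (h1 : '\n' ∉ sub) (hne : sub ≠ [])
    (hin : sub <:+: l) :
    PySem.Chars.find (l ++ '\n' :: rest) sub = PySem.Chars.find l sub ∧
    0 ≤ PySem.Chars.find l sub ∧
    (PySem.Chars.find l sub).toNat + sub.length ≤ l.length := by
  have h0 : 0 ≤ PySem.Chars.find l sub := (PySem.Chars.find_nonneg_iff l sub).mpr hin
  obtain ⟨hp, hmin⟩ := PySem.Chars.find_spec h0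
  have hle := PySem.Chars.find_le_length l sub
  have hql : (PySem.Chars.find l sub).toNat + sub.length ≤ l.length := by
    have hll := hp.length_le
    rw [List.length_drop] at hll
    omega
  refine ⟨?_, h0, hql⟩
  have heq : PySem.Chars.find (l ++ '\n' :: rest) sub = ((PySem.Chars.find l sub).toNat : Int) := by
    apply pvFindEq
    · exact pvOccL sub l rest _ (by omega) hp
    · intro i hi hpre
      rcases pvOccSplit sub l rest i h1 hpre hne with ⟨_, hpl⟩ | ⟨hb, _⟩
      · exact hmin i hi hpl
      · omega
  rw [heq]
  omega

theorem pvFindInR (sub l rest : List Char) (h1 : '\n' ∉ sub) (hne : sub ≠ [])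
    (hnin : ¬ sub <:+: l) :
    PySem.Chars.find (l ++ '\n' :: rest) sub =
      if PySem.Chars.find rest sub = -1 then -1
      else l.length + 1 + PySem.Chars.find rest sub := by
  by_cases hr : PySem.Chars.find rest sub = -1
  · rw [if_pos hr, PySem.Chars.find_eq_neg_one_iff]
    intro hinf
    obtain ⟨i, hi⟩ : ∃ i, sub <+: (l ++ '\n' :: rest).drop i := by
      rw [PySem.Chars.exists_prefix_drop_iff_isIn, PySem.Chars.isIn_iff_infix]
      exact hinf
    rcases pvOccSplit sub l rest i h1 hi hne with ⟨_, hpl⟩ | ⟨_, hpr⟩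
    · exact hnin (hpl.isInfix.trans (List.drop_suffix _ _).isInfix)
    · rw [PySem.Chars.find_eq_neg_one_iff] at hr
      exact hr (hpr.isInfix.trans (List.drop_suffix _ _).isInfix)
  · rw [if_neg hr]
    have h0 : 0 ≤ PySem.Chars.find rest sub := by
      have := PySem.Chars.neg_one_le_find rest sub
      omega
    obtain ⟨hp, hmin⟩ := PySem.Chars.find_spec h0
    have heq : PySem.Chars.find (l ++ '\n' :: rest) sub =
        ((l.length + 1 + (PySem.Chars.find rest sub).toNat : Nat) : Int) := by
      apply pvFindEq
      · exact pvOccR sub l rest _ hp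
      · intro i hi hpre
        rcases pvOccSplit sub l rest i h1 hpre hne with ⟨_, hpl⟩ | ⟨hb, hpr⟩
        · exact hnin (hpl.isInfix.trans (List.drop_suffix _ _).isInfix)
        · exact hmin _ (by omega) hpr
    rw [heq]
    push_cast
    omega

theorem pvRfindFromEval (s sub : List Char) (p : Nat) (hp : p ≤ s.length) :
    PySem.Chars.rfindFrom s sub 0 (some (p : Int)) = PySem.Chars.rfind (s.take p) sub := by
  have hc1 : ¬ ((s.length : Int) < (p : Int)) := by omega
  have hc2 : ¬ ((p : Int) < 0) := by omega
  simp only [PySem.Chars.rfindFrom, hc1, hc2, if_false]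
  norm_num
  by_cases hrf : PySem.Chars.rfind (s.take p) sub = -1 <;> simp [hrf]

theorem pvRfindGe (s sub : List Char) : -1 ≤ PySem.Chars.rfind s sub := by
  have hgo : PySem.Chars.rfind s sub = PySem.Chars.rfind.go s sub s.length := rfl
  rcases pvRfindGoSpec s.length s sub with ⟨h1, _⟩ | ⟨k, hk1, _, _, _⟩
  · rw [hgo, h1]
  · rw [hgo, hk1]; omega

theorem pvSliceShift (l rest : List Char) (c : Char) (a b : Nat) :
    PySem.Chars.slice (l ++ c :: rest) (some ((l.length + 1 + a : Nat) : Int))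
        (some ((l.length + 1 + b : Nat) : Int)) =
      PySem.Chars.slice rest (some (a : Int)) (some (b : Int)) := by
  rw [PySem.Chars.slice_eq_listSlice, PySem.Chars.slice_eq_listSlice]
  rw [PySem.List.slice_natCast, PySem.List.slice_natCast]
  have hd : (l ++ c :: rest).drop (l.length + 1 + a) = rest.drop a := by
    rw [List.drop_append, List.drop_eq_nil_of_le (by omega)]
    rw [show l.length + 1 + a - l.length = a + 1 by omega]
    simp
  rw [hd]
  congr 1
  omega

theorem pvBShift (sub l rest : List Char) (h1 : '\n' ∉ sub) (hne : sub ≠ []) (hl : '\n' ∉ l)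
    (hnin : ¬ sub <:+: l) : pvB sub (l ++ '\n' :: rest) = pvB sub rest := by
  have hLlen : (l ++ '\n' :: rest).length = l.length + 1 + rest.length := by simp; omega
  unfold pvB
  rw [pvFindInR sub l rest h1 hne hnin]
  by_cases hr : PySem.Chars.find rest sub = -1
  · simp [hr]
  · simp only [if_neg hr]
    have h0 : 0 ≤ PySem.Chars.find rest sub := by
      have := PySem.Chars.neg_one_le_find rest sub
      omega
    have hfl := PySem.Chars.find_le_length rest sub
    obtain ⟨hp, _⟩ := PySem.Chars.find_spec h0
    have hrlen : (PySem.Chars.find rest sub).toNat + sub.length ≤ rest.length := by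
      have hll := hp.length_le
      rw [List.length_drop] at hll
      omega
    set r := (PySem.Chars.find rest sub).toNat with hrdef
    have hrr : PySem.Chars.find rest sub = (r : Int) := by omega
    rw [hrr]
    rw [show (l.length : Int) + 1 + (r : Int) = ((l.length + 1 + r : Nat) : Int) by push_cast; ring]
    rw [if_neg (by push_cast; omega : ¬ (((l.length + 1 + r : Nat) : Int) = -1))]
    rw [pvRfindFromEval (l ++ '\n' :: rest) ['\n'] (l.length + 1 + r) (by simp; omega)]
    rw [pvRfindFromEval rest ['\n'] r (by omega)]
    have htake : (l ++ '\n' :: rest).take (l.length + 1 + r) = l ++ '\n' :: rest.take r := by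
      rw [List.take_append, List.take_of_length_le (by omega)]
      rw [show l.length + 1 + r - l.length = r + 1 by omega]
      simp
    rw [htake, pvRfindApp l (rest.take r) '\n']
    rw [PySem.Chars.findFrom_natCast (l ++ '\n' :: rest) ['\n'] (l.length + 1 + r) (by simp; omega)]
    rw [PySem.Chars.findFrom_natCast rest ['\n'] r (by omega)]
    have hdrop : (l ++ '\n' :: rest).drop (l.length + 1 + r) = rest.drop r := by
      rw [List.drop_append, List.drop_eq_nil_of_le (by omega)]
      rw [show l.length + 1 + r - l.length = r + 1 by omega]
      simp
    rw [hdrop, hLlen]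
    by_cases hrf : PySem.Chars.rfind (rest.take r) ['\n'] = -1 <;>
      by_cases hff : PySem.Chars.find (rest.drop r) ['\n'] = -1
    · simp only [if_pos hrf, if_pos hff]
      norm_num
      convert pvSliceShift l rest '\n' 0 rest.length using 3 <;> push_cast <;> omega
    · have hff0 : 0 ≤ PySem.Chars.find (rest.drop r) ['\n'] := by
        have := PySem.Chars.neg_one_le_find (rest.drop r) ['\n']
        omega
      simp only [if_pos hrf, if_neg hff]
      rw [if_neg (by push_cast; omega), if_neg (by push_cast; omega)]
      rw [show PySem.Chars.find (rest.drop r) ['\n'] =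
        ((PySem.Chars.find (rest.drop r) ['\n']).toNat : Int) by omega]
      convert pvSliceShift l rest '\n' 0 (r + (PySem.Chars.find (rest.drop r) ['\n']).toNat)
        using 3 <;> push_cast <;> omega
    · have hrf0 : 0 ≤ PySem.Chars.rfind (rest.take r) ['\n'] := by
        have := pvRfindGe (rest.take r) ['\n']
        omega
      simp only [if_neg hrf, if_pos hff]
      norm_num
      rw [show PySem.Chars.rfind (rest.take r) ['\n'] =
        ((PySem.Chars.rfind (rest.take r) ['\n']).toNat : Int) by omega]
      convert pvSliceShift l rest '\n' ((PySem.Chars.rfind (rest.take r) ['\n']).toNat + 1)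
        rest.length using 3 <;> push_cast <;> omega
    · have hff0 : 0 ≤ PySem.Chars.find (rest.drop r) ['\n'] := by
        have := PySem.Chars.neg_one_le_find (rest.drop r) ['\n']
        omega
      have hrf0 : 0 ≤ PySem.Chars.rfind (rest.take r) ['\n'] := by
        have := pvRfindGe (rest.take r) ['\n']
        omega
      simp only [if_neg hrf, if_neg hff]
      rw [if_neg (by push_cast; omega), if_neg (by push_cast; omega)]
      rw [show PySem.Chars.find (rest.drop r) ['\n'] =
        ((PySem.Chars.find (rest.drop r) ['\n']).toNat : Int) by omega]
      rw [show PySem.Chars.rfind (rest.take r) ['\n'] =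
        ((PySem.Chars.rfind (rest.take r) ['\n']).toNat : Int) by omega]
      convert pvSliceShift l rest '\n' ((PySem.Chars.rfind (rest.take r) ['\n']).toNat + 1)
        (r + (PySem.Chars.find (rest.drop r) ['\n']).toNat) using 3 <;> push_cast <;> omega

theorem pvMain (sub : List Char) (h1 : '\n' ∉ sub) (hne : sub ≠ []) :
    ∀ (n : Nat) (cs : List Char), cs.length ≤ n → pvA sub (pvSplitNL [] cs) = pvB sub cs := by
  intro n
  induction n with
  | zero =>
    intro cs hcs
    have hnil : cs = [] := List.length_eq_zero_iff.mp (by omega)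
    subst hnil
    have hf : PySem.Chars.find [] sub = -1 := by
      rw [PySem.Chars.find_eq_neg_one_iff]
      intro hinf
      exact hne (List.infix_nil.mp hinf)
    simp [pvSplitNL, pvA, pvB, hf]
  | succ n ih =>
    intro cs hcs
    by_cases hmem : '\n' ∈ cs
    · obtain ⟨l, rest, rfl, hl⟩ := pvFirstNL cs hmem
      rw [pvSplitNL_app l [] rest hl]
      by_cases hinl : PySem.Chars.isIn sub l
      · have hinf : sub <:+: l := (PySem.Chars.isIn_iff_infix sub l).mp hinl
        obtain ⟨hfeq, h0, hql⟩ := pvFindInL sub l rest h1 hne hinf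
        have hle := PySem.Chars.find_le_length l sub
        set q := (PySem.Chars.find l sub).toNat with hq
        have hfind : PySem.Chars.find (l ++ '\n' :: rest) sub = (q : Int) := by rw [hfeq]; omega
        have hAeq : pvA sub ((([] : List Char) ++ l) :: pvSplitNL [] rest) = l := by
          simp [pvA, hinl]
        rw [hAeq]
        unfold pvB
        rw [hfind, if_neg (by omega : ¬ ((q : Int) = -1))]
        rw [pvRfindFromEval (l ++ '\n' :: rest) ['\n'] q (by simp; omega)]
        rw [List.take_append_of_le_length (by omega)]
        rw [pvRfindSingleNeg '\n' (l.take q) (fun hc => hl (List.mem_of_mem_take hc))]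
        rw [PySem.Chars.findFrom_natCast (l ++ '\n' :: rest) ['\n'] q (by simp; omega)]
        have hdrop : (l ++ '\n' :: rest).drop q = l.drop q ++ '\n' :: rest := by
          rw [List.drop_append, Nat.sub_eq_zero_of_le (by omega)]
          simp
        rw [hdrop, pvFindSingleApp (l.drop q) rest '\n' (fun hc => hl (List.mem_of_mem_drop hc))]
        rw [if_neg (by omega : ¬ ((((l.drop q).length : Nat) : Int) = -1))]
        rw [if_neg (by omega : ¬ ((q : Int) + (((l.drop q).length : Nat) : Int) = -1))]
        rw [show (q : Int) + (((l.drop q).length : Nat) : Int) = ((l.length : Nat) : Int) by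
          simp only [List.length_drop]; omega]
        rw [show (-1 + 1 : Int) = ((0 : Nat) : Int) by norm_num]
        rw [PySem.Chars.slice_eq_listSlice, PySem.List.slice_natCast]
        simp
      · have hninf : ¬ sub <:+: l := fun hh => hinl ((PySem.Chars.isIn_iff_infix sub l).mpr hh)
        have hA : pvA sub ((([] : List Char) ++ l) :: pvSplitNL [] rest) =
            pvA sub (pvSplitNL [] rest) := by
          simp [pvA, hinl]
        rw [hA, ih rest (by simp at hcs; omega), pvBShift sub l rest h1 hne hl hninf]
    · rw [pvSplitNL_no cs [] hmem]
      by_cases hin : sub <:+: cs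
      · have h0 : 0 ≤ PySem.Chars.find cs sub := (PySem.Chars.find_nonneg_iff cs sub).mpr hin
        have hle := PySem.Chars.find_le_length cs sub
        set q := (PySem.Chars.find cs sub).toNat with hq
        have hfind : PySem.Chars.find cs sub = (q : Int) := by omega
        have hA : pvA sub [([] : List Char) ++ cs] = cs := by
          simp [pvA, (PySem.Chars.isIn_iff_infix sub cs).mpr hin]
        rw [hA]
        unfold pvB
        rw [hfind, if_neg (by omega : ¬ ((q : Int) = -1))]
        rw [pvRfindFromEval cs ['\n'] q (by omega)]
        rw [pvRfindSingleNeg '\n' (cs.take q) (fun hc => hmem (List.mem_of_mem_take hc))]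
        rw [PySem.Chars.findFrom_natCast cs ['\n'] q (by omega)]
        rw [pvFindSingleNeg '\n' (cs.drop q) (fun hc => hmem (List.mem_of_mem_drop hc))]
        norm_num [PySem.List.slice_to]
      · have hisin : PySem.Chars.isIn sub cs = false :=
          (PySem.Chars.isIn_eq_false_iff sub cs).mpr hin
        have hf : PySem.Chars.find cs sub = -1 :=
          (PySem.Chars.find_eq_neg_one_iff cs sub).mpr hin
        simp [pvA, hisin, pvB, hf]

theorem pvLoopA_toList (L : List String) :
    (pvLoopA L).toList = pvA ("window._sharedData =".toList) (L.map String.toList) := by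
  induction L with
  | nil => simp [pvLoopA, pvA]
  | cons line rest ih =>
    simp only [pvLoopA, pvA, List.map_cons, PySem.Str.isIn_eq]
    by_cases hc : PySem.Chars.isIn ("window._sharedData =".toList) line.toList = true
    · rw [if_pos hc, if_pos hc]
    · rw [if_neg hc, if_neg hc]
      exact ih

theorem pvBridgeA (s : String) :
    (extract_json_data_from_html_py s).toList =
      pvA ("window._sharedData =".toList) (pvSplitNL [] s.toList) := by
  have hsplit := PySem.Str.split?_map s "\n"
  rw [show ("\n" : String).toList = ['\n'] from rfl] at hsplit
  cases h : PySem.Str.split? s "\n" with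
  | none =>
    rw [h] at hsplit
    simp [PySem.Chars.split?] at hsplit
  | some L =>
    rw [h] at hsplit
    simp only [Option.map_some] at hsplit
    have hsome : PySem.Chars.split? s.toList ['\n'] =
        some (PySem.Chars.splitOn s.toList ['\n']) := by
      simp [PySem.Chars.split?]
    rw [hsome] at hsplit
    have hL : L.map String.toList = PySem.Chars.splitOn s.toList ['\n'] :=
      Option.some.inj hsplit
    unfold extract_json_data_from_html_py
    rw [h]
    simp only [Option.getD_some]
    rw [pvLoopA_toList, hL, pvSplitOn_eq]

theorem pvBridgeB (s : String) :
    (extract_json_data_from_html_py_alt s).toList =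
      pvB ("window._sharedData =".toList) s.toList := by
  unfold extract_json_data_from_html_py_alt pvB
  simp only [PySem.Str.find_eq, PySem.Str.rfindFrom_eq, PySem.Str.findFrom_eq, PySem.Str.len_eq,
    show ("\n" : String).toList = ['\n'] from rfl]
  by_cases hp : PySem.Chars.find s.toList ("window._sharedData =".toList) = -1
  · rw [if_pos hp, if_pos hp]
    rfl
  · rw [if_neg hp, if_neg hp]
    rw [PySem.Str.toList_slice]

-- ===== VERDICT (by name: the statement is the Claim_ definition above) =====
theorem extract_json_data_from_html_py_spec : Claim_equal_extract_json_data_from_html_py := by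
  intro s _
  unfold Spec_extract_json_data_from_html_py
  apply String.toList_inj.mp
  rw [pvBridgeA, pvBridgeB]
  exact pvMain _ (by decide) (by decide) s.toList.length s.toList le_rfl
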